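-- pv_equiv track=rewrite | github.com/tessyjonburica/Group-4 | ChemistryTool/equation_balancer.py | _is_equation_balanced
-- ===== SOURCE A (Python) =====
-- from typing import Dict, List, Tuple, Optional
--
-- def _is_equation_balanced(reactants: List[str], products: List[str],
--                         compound_elements: Dict[str, Dict[str, int]]) -> bool:
--     """
--     Check if an equation is already balanced.
--
--     Args:
--         reactants (List[str]): List of reactant formulas
--         products (List[str]): List of product formulas
--         compound_elements (Dict[str, Dict[str, int]]): Element counts for each compound
--
--     Returns:
--         bool: True if equation is balanced, False otherwise
--     """
--     # Count elements on each side
--     reactant_elements = {}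
--     product_elements = {}
--
--     # Count elements in reactants
--     for reactant in reactants:
--         elements = compound_elements[reactant]
--         for element, count in elements.items():
--             if element in reactant_elements:
--                 reactant_elements[element] += count
--             else:
--                 reactant_elements[element] = count
--
--     # Count elements in products
--     for product in products:
--         elements = compound_elements[product]
--         for element, count in elements.items():
--             if element in product_elements:
--                 product_elements[element] += count
--             else:
--                 product_elements[element] = count
--
--     # Check if all elements are balanced
--     all_elements = set(reactant_elements.keys()) | set(product_elements.keys())
--
--     for element in all_elements:
--         reactant_count = reactant_elements.get(element, 0)
--         product_count = product_elements.get(element, 0)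
--
--         if reactant_count != product_count:
--             return False
--
--     return True
-- ===== SOURCE B (Python) =====
-- from typing import Dict, List
--
-- def _is_equation_balanced(reactants: List[str], products: List[str],
--                         compound_elements: Dict[str, Dict[str, int]]) -> bool:
--     # Element-by-element check: no per-side counter dicts are built at all.
--     # Collect the set of element names that occur on either side, then for each
--     # element recompute its total on each side by a direct generator-sum over
--     # the compounds, and require the two totals to agree.
--     elements = set()
--     for compound in reactants + products:
--         elements.update(compound_elements[compound])
--
--     def total(side, element):
--         return sum(compound_elements[c].get(element, 0) for c in side)
--
--     return all(total(reactants, e) == total(products, e) for e in elements)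
-- ===== Notes on version B (the rewrite author's own statement) =====
-- stated objective: alternative
-- what changed: B builds no per-side counters at all: it collects the set of element names occurring on either side and then, element by element, recomputes each side's total with a direct generator-sum over the compounds and compares the two totals.
import Mathlib
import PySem

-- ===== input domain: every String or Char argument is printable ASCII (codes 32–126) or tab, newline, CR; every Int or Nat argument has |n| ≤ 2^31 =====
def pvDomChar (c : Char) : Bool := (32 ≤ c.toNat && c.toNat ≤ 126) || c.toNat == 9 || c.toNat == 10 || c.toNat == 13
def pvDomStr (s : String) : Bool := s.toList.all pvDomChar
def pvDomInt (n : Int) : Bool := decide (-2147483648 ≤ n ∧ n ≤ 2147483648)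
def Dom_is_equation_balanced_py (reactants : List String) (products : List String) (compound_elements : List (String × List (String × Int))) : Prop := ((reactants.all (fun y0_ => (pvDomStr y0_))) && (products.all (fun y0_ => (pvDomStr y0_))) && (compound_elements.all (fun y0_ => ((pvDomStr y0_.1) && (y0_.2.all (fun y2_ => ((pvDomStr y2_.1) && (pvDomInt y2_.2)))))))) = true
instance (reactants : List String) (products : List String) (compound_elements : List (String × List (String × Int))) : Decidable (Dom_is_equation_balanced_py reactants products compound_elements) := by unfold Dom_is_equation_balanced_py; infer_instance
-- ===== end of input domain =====

-- B checks balance element-by-element (a set of element names, then a direct per-element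
-- summation over each side) instead of A's two per-side counter dicts plus a key-union
-- reconciliation pass (objective: alternative; return-value equivalence only).


-- ===== PORT A =====
-- A's per-compound inner loop: for element, count in elements.items():
--   if element in side: side[element] += count else: side[element] = count
def pvAddElems (d : PySem.Dict String Int) (elems : List (String × Int)) : PySem.Dict String Int :=
  elems.foldl (fun d ec =>
    match d.get? ec.1 with
    | some v => d.insert ec.1 (v + ec.2)
    | none   => d.insert ec.1 ec.2) d

-- 'compound_elements[compound]' raises KeyError when missing; that is excluded by
-- Pre_ below, so the total form getD … [] is used here (value unconstrained outside Pre_).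
def is_equation_balanced_py (reactants : List String) (products : List String) (compound_elements : List (String × List (String × Int))) : Bool :=
  let ce := PySem.Dict.mk compound_elements
  let reactant_elements :=
    reactants.foldl (fun d r => pvAddElems d (ce.getD r [])) PySem.Dict.empty
  let product_elements :=
    products.foldl (fun d p => pvAddElems d (ce.getD p [])) PySem.Dict.empty
  let all_elements :=
    PySem.Set.union (PySem.Set.ofList reactant_elements.keys) (PySem.Set.ofList product_elements.keys)
  -- for element in all_elements: if reactant_count != product_count: return False / return True
  all_elements.all (fun e => reactant_elements.getD e 0 == product_elements.getD e 0)

-- ===== PORT B =====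
-- elements.update(compound_elements[compound]) adds the inner dict's KEYS;
-- compound_elements[c].get(element, 0) is a dict lookup with default 0.
def is_equation_balanced_py_alt (reactants : List String) (products : List String) (compound_elements : List (String × List (String × Int))) : Bool :=
  let ce := PySem.Dict.mk compound_elements
  let elements :=
    (reactants ++ products).foldl
      (fun s c => PySem.Set.update s ((ce.getD c []).map Prod.fst)) PySem.Set.empty
  let total := fun (side : List String) (e : String) =>
    (side.map (fun c => (PySem.Dict.mk (ce.getD c [])).getD e 0)).sum
  elements.all (fun e => total reactants e == total products e)

-- ===== PRECONDITION & SPEC =====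
-- The first two clauses exclude exactly the inputs on which 'compound_elements[compound]'
-- raises KeyError (B raises there too).  The third excludes inner association lists with a
-- duplicate element key: such lists do not arise from any Python dict[str, int] (dict keys
-- are unique), and on them A's items-iteration sums the duplicates while B's .get reads one.
def Pre_is_equation_balanced_py (reactants : List String) (products : List String) (compound_elements : List (String × List (String × Int))) : Prop :=
  (∀ r ∈ reactants, r ∈ compound_elements.map Prod.fst) ∧
  (∀ p ∈ products, p ∈ compound_elements.map Prod.fst) ∧
  (∀ q ∈ compound_elements, (q.2.map Prod.fst).Nodup)
instance (reactants : List String) (products : List String) (compound_elements : List (String × List (String × Int))) : Decidable (Pre_is_equation_balanced_py reactants products compound_elements) := by unfold Pre_is_equation_balanced_py; infer_instance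

def pvWitness_is_equation_balanced_py : List String × List String × (List (String × List (String × Int))) :=
  (["H2", "O2"], ["H2O"], [("H2", [("H", 2)]), ("O2", [("O", 2)]), ("H2O", [("H", 2), ("O", 1)])])

def Spec_is_equation_balanced_py (reactants : List String) (products : List String) (compound_elements : List (String × List (String × Int))) (out : Bool) : Prop := out = is_equation_balanced_py_alt reactants products compound_elements
instance (reactants : List String) (products : List String) (compound_elements : List (String × List (String × Int))) (out : Bool) : Decidable (Spec_is_equation_balanced_py reactants products compound_elements out) := by unfold Spec_is_equation_balanced_py; infer_instance

-- ===== CLAIM (what is proved, stated in full; the proofs are below) =====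
def Claim_equal_is_equation_balanced_py : Prop := ∀ (reactants : List String) (products : List String) (compound_elements : List (String × List (String × Int))), Dom_is_equation_balanced_py reactants products compound_elements → Pre_is_equation_balanced_py reactants products compound_elements → Spec_is_equation_balanced_py reactants products compound_elements (is_equation_balanced_py reactants products compound_elements)

-- ===== LEMMAS AND PROOFS =====

-- net contribution of one compound's element list to one element
def pvSumKey (elems : List (String × Int)) (e : String) : Int :=
  (elems.map (fun p => if p.1 = e then p.2 else 0)).sum

def pvSideSum (side : List String) (ce : PySem.Dict String (List (String × Int))) (e : String) : Int :=
  (side.map (fun c => pvSumKey (ce.getD c []) e)).sum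

-- A's conditional-update inner step rewritten through getD
theorem pvAddElems_eq (d : PySem.Dict String Int) (elems : List (String × Int)) :
    pvAddElems d elems =
      elems.foldl (fun d ec => d.insert ec.1 (d.getD ec.1 0 + ec.2)) d := by
  unfold pvAddElems
  congr 1
  funext d ec
  cases h : d.get? ec.1 with
  | some v => simp [PySem.Dict.getD_eq_get?_getD, h]
  | none => simp [PySem.Dict.getD_eq_get?_getD, h]

theorem pvInner_add_getD (elems : List (String × Int)) (d : PySem.Dict String Int) (e : String) :
    (elems.foldl (fun d ec => d.insert ec.1 (d.getD ec.1 0 + ec.2)) d).getD e 0 =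
      d.getD e 0 + pvSumKey elems e := by
  induction elems generalizing d with
  | nil => simp [pvSumKey]
  | cons p rest ih =>
      simp only [List.foldl_cons, ih, pvSumKey, List.map_cons, List.sum_cons]
      rw [PySem.Dict.getD_insert]
      by_cases h : e = p.1 <;> simp [h, Ne.symm] <;> try ring

theorem pvOuter_add_getD (side : List String) (ce : PySem.Dict String (List (String × Int)))
    (d : PySem.Dict String Int) (e : String) :
    (side.foldl (fun d c => (ce.getD c []).foldl (fun d ec => d.insert ec.1 (d.getD ec.1 0 + ec.2)) d) d).getD e 0 =
      d.getD e 0 + pvSideSum side ce e := by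
  induction side generalizing d with
  | nil => simp [pvSideSum]
  | cons c rest ih =>
      simp only [List.foldl_cons, ih, pvSideSum, List.map_cons, List.sum_cons, pvInner_add_getD]
      ring

theorem pvOuter_add_mem_keys (side : List String) (ce : PySem.Dict String (List (String × Int)))
    (d : PySem.Dict String Int) (e : String) :
    (e ∈ (side.foldl (fun d c => (ce.getD c []).foldl (fun d ec => d.insert ec.1 (d.getD ec.1 0 + ec.2)) d) d).keys) ↔
      e ∈ d.keys ∨ ∃ c ∈ side, e ∈ (ce.getD c []).map Prod.fst := by
  induction side generalizing d with
  | nil => simp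
  | cons c rest ih =>
      simp only [List.foldl_cons, ih]
      rw [PySem.Dict.keys_foldl_insert_key]
      simp [PySem.Set.mem_update, or_assoc]

-- membership in B's element-name set
theorem pvElems_mem (cs : List String) (ce : PySem.Dict String (List (String × Int)))
    (s : PySem.Set String) (e : String) :
    (e ∈ cs.foldl (fun s c => PySem.Set.update s ((ce.getD c []).map Prod.fst)) s) ↔
      e ∈ s ∨ ∃ c ∈ cs, e ∈ (ce.getD c []).map Prod.fst := by
  induction cs generalizing s with
  | nil => simp
  | cons c rest ih =>
      simp only [List.foldl_cons, ih]
      simp [PySem.Set.mem_update, or_assoc]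

-- a first-match dict lookup equals the net sum when the keys are distinct
theorem pvGet0_eq_sumKey (elems : List (String × Int)) (e : String)
    (h : (elems.map Prod.fst).Nodup) :
    (PySem.Dict.mk elems).getD e 0 = pvSumKey elems e := by
  induction elems with
  | nil => simp [pvSumKey, PySem.Dict.getD_eq_get?_getD, PySem.Dict.get?]
  | cons p rest ih =>
      simp only [List.map_cons, List.nodup_cons] at h
      rw [PySem.Dict.getD_eq_get?_getD, PySem.Dict.get?_mk_cons]
      by_cases he : p.1 = e
      · have hz : (List.map (fun q => if q.1 = e then q.2 else 0) rest).sum = 0 := by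
          rw [List.sum_eq_zero]
          intro x hx
          simp only [List.mem_map] at hx
          obtain ⟨q, hq, rfl⟩ := hx
          have hne : q.1 ≠ e := fun hqe => h.1 (by
            subst he; rw [← hqe]; exact List.mem_map_of_mem hq)
          simp [hne]
        simp [pvSumKey, he, hz]
      · rw [if_neg (by simpa using he), ← PySem.Dict.getD_eq_get?_getD, ih h.2]
        simp [pvSumKey, he]

-- each inner list reached through ce satisfies the Nodup clause of Pre_
theorem pvGetD_nodup (compound_elements : List (String × List (String × Int)))
    (hnd : ∀ q ∈ compound_elements, (q.2.map Prod.fst).Nodup) (c : String) :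
    (((PySem.Dict.mk compound_elements).getD c []).map Prod.fst).Nodup := by
  rw [PySem.Dict.getD_eq_get?_getD]
  cases h : (PySem.Dict.mk compound_elements).get? c with
  | none => simp
  | some v =>
      simp only [Option.getD_some]
      exact hnd _ (PySem.Dict.mem_items_of_get?_eq_some _ h)

-- ===== VERDICT (by name: the statement is the Claim_ definition above) =====
theorem is_equation_balanced_py_spec : Claim_equal_is_equation_balanced_py := by
  intro reactants products compound_elements _ hpre
  unfold Spec_is_equation_balanced_py is_equation_balanced_py is_equation_balanced_py_alt
  simp only [pvAddElems_eq]
  set ce := PySem.Dict.mk compound_elements with hce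
  have htot : ∀ (side : List String) (e : String),
      (side.map (fun c => (PySem.Dict.mk (ce.getD c [])).getD e 0)).sum = pvSideSum side ce e := by
    intro side e
    unfold pvSideSum
    congr 1
    refine List.map_congr_left (fun c _ => ?_)
    exact pvGet0_eq_sumKey _ _ (pvGetD_nodup compound_elements hpre.2.2 c)
  have hget : ∀ (side : List String) (e : String),
      (side.foldl (fun d c => (ce.getD c []).foldl (fun d ec => d.insert ec.1 (d.getD ec.1 0 + ec.2)) d) PySem.Dict.empty).getD e 0 = pvSideSum side ce e := by
    intro side e; rw [pvOuter_add_getD]; simp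
  have hmem : ∀ (side : List String) (e : String),
      (e ∈ (side.foldl (fun d c => (ce.getD c []).foldl (fun d ec => d.insert ec.1 (d.getD ec.1 0 + ec.2)) d) PySem.Dict.empty).keys) ↔ ∃ c ∈ side, e ∈ (ce.getD c []).map Prod.fst := by
    intro side e
    rw [pvOuter_add_mem_keys]
    simp only [PySem.Dict.keys_empty, List.not_mem_nil, false_or]
  rw [Bool.eq_iff_iff]
  simp only [List.all_eq_true, PySem.Set.mem_union, PySem.Set.mem_ofList, beq_iff_eq, htot]
  constructor
  · intro h e he
    rw [pvElems_mem] at he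
    simp only [PySem.Set.empty, List.not_mem_nil, false_or, List.mem_append] at he
    obtain ⟨c, hc, hec⟩ := he
    have : e ∈ (reactants.foldl (fun d c => (ce.getD c []).foldl (fun d ec => d.insert ec.1 (d.getD ec.1 0 + ec.2)) d) PySem.Dict.empty).keys ∨
           e ∈ (products.foldl (fun d c => (ce.getD c []).foldl (fun d ec => d.insert ec.1 (d.getD ec.1 0 + ec.2)) d) PySem.Dict.empty).keys := by
      cases hc with
      | inl hr => exact Or.inl ((hmem reactants e).mpr ⟨c, hr, hec⟩)
      | inr hp => exact Or.inr ((hmem products e).mpr ⟨c, hp, hec⟩)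
    have := h e this
    rw [hget, hget] at this
    exact this
  · intro h e he
    rw [hget, hget]
    apply h
    rw [pvElems_mem]
    simp only [PySem.Set.empty, List.not_mem_nil, false_or, List.mem_append]
    cases he with
    | inl hr => obtain ⟨c, hc, hec⟩ := (hmem reactants e).mp hr; exact ⟨c, Or.inl hc, hec⟩
    | inr hp => obtain ⟨c, hc, hec⟩ := (hmem products e).mp hp; exact ⟨c, Or.inr hc, hec⟩
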